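-- pv_equiv track=rewrite | github.com/maxwshen/prime-peptide | processing/cx_overall_quant.py | check_indel_quality_support
-- ===== SOURCE A (Python) =====
-- def q_to_score(q):
--   return ord(q) - 33
--
-- def check_indel_quality_support(read, ref, qs):
--   threshold = 30
--   radii = 3
--   events = []
--   for c, r, q in zip(read, ref, qs):
--     if r == '-' or c == '-':
--       events.append('indel')
--     else:
--       events.append(q_to_score(q))
--
--   for idx, e in enumerate(events):
--     left = max(0, idx - radii)
--     right = min(len(events), idx + radii + 1)
--     if 'indel' in events[left : right]:
--       if e != 'indel' and e < threshold:
--         return False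
--   return True
-- ===== SOURCE B (Python) =====
-- def check_indel_quality_support(read, ref, qs):
--     # One pass records indel positions and per-position scores; only the union
--     # of radius-3 windows around indels is then checked against the threshold.
--     indels = []
--     scores = []
--     for i, (c, r, q) in enumerate(zip(read, ref, qs)):
--         if r == '-' or c == '-':
--             indels.append(i)
--             scores.append(None)
--         else:
--             scores.append(ord(q) - 33)
--     n = len(scores)
--     flagged = set()
--     for p in indels:
--         flagged.update(range(max(0, p - 3), min(n, p + 4)))
--     for i in flagged:
--         s = scores[i]
--         if s is not None and s < 30:
--             return False
--     return True
-- ===== Notes on version B (the rewrite author's own statement) =====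
-- stated objective: faster
-- what changed: Instead of building and scanning a radius-3 window slice at every position, B records indel positions in one pass, unions their radius-3 windows into a flagged index set, and checks the quality threshold only at flagged non-indel positions, so per-position slice construction disappears.
import Mathlib
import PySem

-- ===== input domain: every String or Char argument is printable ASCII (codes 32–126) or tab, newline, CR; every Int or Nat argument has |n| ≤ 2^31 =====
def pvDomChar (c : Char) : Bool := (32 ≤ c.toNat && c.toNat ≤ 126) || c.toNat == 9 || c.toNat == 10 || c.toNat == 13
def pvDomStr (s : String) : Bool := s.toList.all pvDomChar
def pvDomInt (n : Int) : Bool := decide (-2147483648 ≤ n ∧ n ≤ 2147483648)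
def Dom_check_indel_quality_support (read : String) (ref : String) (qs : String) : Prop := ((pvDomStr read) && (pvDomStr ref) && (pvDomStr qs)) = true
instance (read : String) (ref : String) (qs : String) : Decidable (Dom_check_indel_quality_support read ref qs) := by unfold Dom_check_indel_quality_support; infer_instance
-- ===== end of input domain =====

-- B replaces A's per-position window re-scan by an indel-driven pass: it collects indel
-- positions once, unions their radius-3 windows into a flagged set, and checks only those.

-- ===== PORT A =====
def qToScore (q : Char) : Int := (q.toNat : Int) - 33

def pvF (p : Char × (Char × Char)) : Option Int :=
  if p.2.1 = '-' || p.1 = '-' then none else some (qToScore p.2.2)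

-- events: 'indel' ↦ none, a score ↦ some score (the first loop of A)
def pvEvents (read ref qs : String) : List (Option Int) :=
  (read.toList.zip (ref.toList.zip qs.toList)).map pvF

def check_indel_quality_support (read : String) (ref : String) (qs : String) : Bool :=
  let events := pvEvents read ref qs
  !((PySem.List.enumerate events).any (fun ie =>
      ((PySem.List.slice events (some (max 0 (ie.1 - 3)))
          (some (min (events.length : Int) (ie.1 + 3 + 1)))).contains none)
      && (match ie.2 with
          | none => false
          | some s => decide (s < 30))))

-- ===== PORT B =====
-- first loop of B: accumulate (indel positions, scores with none at indels)
def pvStepB (acc : List Int × List (Option Int)) (ie : Int × (Char × (Char × Char))) :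
    List Int × List (Option Int) :=
  if ie.2.2.1 = '-' || ie.2.1 = '-' then (acc.1 ++ [ie.1], acc.2 ++ [none])
  else (acc.1, acc.2 ++ [some (qToScore ie.2.2.2)])

def check_indel_quality_support_alt (read : String) (ref : String) (qs : String) : Bool :=
  let pair := (PySem.List.enumerate (read.toList.zip (ref.toList.zip qs.toList))).foldl pvStepB ([], [])
  let scores := pair.2
  let n : Int := (scores.length : Int)
  let flagged : PySem.Set Int :=
    pair.1.foldl (fun s p =>
      PySem.Set.update s (PySem.List.pyRange (max 0 (p - 3)) (min n (p + 4)) 1)) PySem.Set.empty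
  flagged.all (fun i =>
    match PySem.List.pyGet? scores i with
    | some (some s) => !decide (s < 30)
    | _ => true)  -- 'some none' = indel position (skipped); outer 'none' unreachable: flagged ⊆ [0, n)

-- ===== PRECONDITION & SPEC =====
def Spec_check_indel_quality_support (read : String) (ref : String) (qs : String) (out : Bool) : Prop := out = check_indel_quality_support_alt read ref qs
instance (read : String) (ref : String) (qs : String) (out : Bool) : Decidable (Spec_check_indel_quality_support read ref qs out) := by unfold Spec_check_indel_quality_support; infer_instance

-- ===== CLAIM (what is proved, stated in full; the proofs are below) =====
def Claim_equal_check_indel_quality_support : Prop := ∀ (read : String) (ref : String) (qs : String), Dom_check_indel_quality_support read ref qs → Spec_check_indel_quality_support read ref qs (check_indel_quality_support read ref qs)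

-- ===== LEMMAS AND PROOFS =====

-- positions (starting at s) of the none entries of a list
def nonePos : List (Option Int) → Int → List Int
  | [], _ => []
  | none :: t, s => s :: nonePos t (s + 1)
  | some _ :: t, s => nonePos t (s + 1)

lemma mem_nonePos (l : List (Option Int)) (s p : Int) :
    p ∈ nonePos l s ↔ ∃ k : Nat, l[k]? = some none ∧ p = s + k := by
  induction l generalizing s with
  | nil => simp [nonePos]
  | cons x t ih =>
    cases x with
    | none =>
      simp only [nonePos, List.mem_cons, ih]
      constructor
      · rintro (rfl | ⟨k, hk, rfl⟩)
        · exact ⟨0, by simp, by simp⟩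
        · exact ⟨k + 1, by simpa using hk, by push_cast; ring⟩
      · rintro ⟨k, hk, rfl⟩
        cases k with
        | zero => left; simp
        | succ k => right; exact ⟨k, by simpa using hk, by push_cast; ring⟩
    | some v =>
      simp only [nonePos, ih]
      constructor
      · rintro ⟨k, hk, rfl⟩
        exact ⟨k + 1, by simpa using hk, by push_cast; ring⟩
      · rintro ⟨k, hk, rfl⟩
        cases k with
        | zero => simp at hk
        | succ k => exact ⟨k, by simpa using hk, by push_cast; ring⟩

lemma foldB (zs : List (Char × (Char × Char))) (s : Int) (is : List Int) (sc : List (Option Int)) :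
    (PySem.List.enumerate zs s).foldl pvStepB (is, sc)
      = (is ++ nonePos (zs.map pvF) s, sc ++ zs.map pvF) := by
  induction zs generalizing s is sc with
  | nil => simp [PySem.List.enumerate_nil, nonePos]
  | cons x t ih =>
    rw [PySem.List.enumerate_cons]
    by_cases h : x.2.1 = '-' || x.1 = '-'
    · simp [List.foldl_cons, pvStepB, h, ih, pvF, nonePos]
    · simp [List.foldl_cons, pvStepB, h, ih, pvF, nonePos]

lemma mem_foldl_update (ps : List Int) (s0 : PySem.Set Int) (g : Int → List Int) (i : Int) :
    i ∈ ps.foldl (fun s p => PySem.Set.update s (g p)) s0 ↔ i ∈ s0 ∨ ∃ p ∈ ps, i ∈ g p := by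
  induction ps generalizing s0 with
  | nil => simp
  | cons q t ih =>
    simp only [List.foldl_cons, ih, PySem.Set.mem_update, List.mem_cons]
    constructor
    · rintro ((h | h) | ⟨p, hp, hi⟩)
      · exact Or.inl h
      · exact Or.inr ⟨q, Or.inl rfl, h⟩
      · exact Or.inr ⟨p, Or.inr hp, hi⟩
    · rintro (h | ⟨p, (rfl | hp), hi⟩)
      · exact Or.inl (Or.inl h)
      · exact Or.inl (Or.inr hi)
      · exact Or.inr ⟨p, hp, hi⟩

lemma mem_dropTake {α : Type} (l : List α) (a t : Nat) (x : α) :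
    x ∈ (l.drop a).take t ↔ ∃ j : Nat, j < t ∧ a + j < l.length ∧ l[a + j]? = some x := by
  constructor
  · intro hx
    rcases List.mem_iff_getElem.mp hx with ⟨j, hj, hget⟩
    have hj' : j < t ∧ a + j < l.length := by
      have := hj
      simp [List.length_take, List.length_drop] at this
      omega
    refine ⟨j, hj'.1, hj'.2, ?_⟩
    rw [List.getElem?_eq_getElem hj'.2]
    rw [List.getElem_take, List.getElem_drop] at hget
    exact congrArg some hget
  · rintro ⟨j, hjt, hjl, hget⟩
    apply List.mem_iff_getElem.mpr
    refine ⟨j, by simp [List.length_take, List.length_drop]; omega, ?_⟩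
    rw [List.getElem_take, List.getElem_drop]
    rw [List.getElem?_eq_getElem hjl] at hget
    exact Option.some.injEq _ _ ▸ (by simpa using hget)

lemma contains_none_slice (l : List (Option Int)) (a b : Int) (ha : 0 ≤ a) (hb : 0 ≤ b) :
    ((PySem.List.slice l (some a) (some b)).contains (none : Option Int) = true)
      ↔ ∃ j : Nat, a ≤ (j : Int) ∧ (j : Int) < b ∧ l[j]? = some none := by
  rw [PySem.List.slice_toNat l ha hb]
  rw [List.contains_iff_mem, mem_dropTake]
  constructor
  · rintro ⟨j, hjt, hjl, hget⟩
    refine ⟨a.toNat + j, ?_, ?_, hget⟩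
    · omega
    · omega
  · rintro ⟨j, hja, hjb, hget⟩
    refine ⟨j - a.toNat, by omega, by
      have : j < l.length := (List.getElem?_eq_some_iff.mp hget).1
      omega, ?_⟩
    have : a.toNat + (j - a.toNat) = j := by omega
    rw [this]; exact hget

-- the semantic content, symmetric in which index carries the window
def pvSem (l : List (Option Int)) : Prop :=
  ∀ k j : Nat, ∀ v : Int, l[k]? = some (some v) → v < 30 → l[j]? = some none →
    ¬((k : Int) - 3 ≤ (j : Int) ∧ (j : Int) < (k : Int) + 4)

lemma A_iff (read ref qs : String) :
    check_indel_quality_support read ref qs = true ↔ pvSem (pvEvents read ref qs) := by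
  unfold check_indel_quality_support
  set l := pvEvents read ref qs with hl
  simp only [Bool.not_eq_eq_eq_not, Bool.not_true, List.any_eq_false,
    PySem.List.mem_enumerate_iff, forall_exists_index]
  constructor
  · intro H k j v hk hv hj hw
    obtain ⟨hklen, hkval⟩ := List.getElem?_eq_some_iff.mp hk
    obtain ⟨hjlen, -⟩ := List.getElem?_eq_some_iff.mp hj
    refine H (0 + (k : Int), l[k]) k hklen rfl ?_
    refine Bool.and_eq_true_iff.mpr ⟨?_, ?_⟩
    · refine (contains_none_slice l _ _ (by omega) (by omega)).mpr ⟨j, by omega, by omega, hj⟩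
    · simp [hkval, hv]
  · intro H x k hklen hx hX
    subst hx
    obtain ⟨h1, h2⟩ := Bool.and_eq_true_iff.mp hX
    obtain ⟨j, hja, hjb, hjget⟩ := (contains_none_slice l _ _ (by omega) (by omega)).mp h1
    cases hek : l[k] with
    | none => rw [hek] at h2; simp at h2
    | some v =>
      rw [hek] at h2
      have hv : v < 30 := by simpa using h2
      exact H k j v (List.getElem?_eq_some_iff.mpr ⟨hklen, hek⟩) hv hjget ⟨by omega, by omega⟩

lemma B_iff (read ref qs : String) :
    check_indel_quality_support_alt read ref qs = true ↔ pvSem (pvEvents read ref qs) := by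
  unfold check_indel_quality_support_alt
  rw [foldB]
  simp only [List.nil_append]
  set l : List (Option Int) := (read.toList.zip (ref.toList.zip qs.toList)).map pvF with hl
  have hpe : pvEvents read ref qs = l := rfl
  rw [hpe, List.all_eq_true]
  simp only [mem_foldl_update, PySem.Set.empty, List.not_mem_nil, false_or, mem_nonePos,
    PySem.List.mem_pyRange_one, zero_add, forall_exists_index, and_imp]
  constructor
  · intro H k j v hk hv hj hw
    obtain ⟨hklen, hkval⟩ := List.getElem?_eq_some_iff.mp hk
    obtain ⟨hjlen, -⟩ := List.getElem?_eq_some_iff.mp hj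
    have h := H (k : Int) (j : Int) j hj rfl (by omega) (by omega)
    rw [PySem.List.pyGet?_of_nonneg l (by omega : (0:Int) ≤ (k:Int))] at h
    simp only [Int.toNat_natCast] at h
    rw [List.getElem?_eq_getElem hklen, hkval] at h
    simp [hv] at h
  · intro H i jInt j hj hji hlo hhi
    subst hji
    have h0 : 0 ≤ i := le_trans (le_max_left 0 _) hlo
    have hilen : i < (l.length : Int) := lt_of_lt_of_le hhi (min_le_left _ _)
    rw [PySem.List.pyGet?_of_nonneg l h0]
    have hik : ((i.toNat : Int)) = i := Int.toNat_of_nonneg h0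
    have hklen : i.toNat < l.length := by omega
    rw [List.getElem?_eq_getElem hklen]
    cases hek : l[i.toNat] with
    | none => simp
    | some v =>
      by_cases hv : v < 30
      · exact absurd ⟨by omega, by omega⟩
          (H i.toNat j v (List.getElem?_eq_some_iff.mpr ⟨hklen, hek⟩) hv hj)
      · simp [hv]

-- ===== VERDICT (by name: the statement is the Claim_ definition above) =====
theorem check_indel_quality_support_spec : Claim_equal_check_indel_quality_support := by
  intro read ref qs _
  unfold Spec_check_indel_quality_support
  have hA := A_iff read ref qs
  have hB := B_iff read ref qs
  cases hA' : check_indel_quality_support read ref qs <;>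
  cases hB' : check_indel_quality_support_alt read ref qs <;> simp_all
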